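-- pv_equiv track=rewrite | github.com/Muthres-1/DSA_A_TO_Z | Dp/Dp-On-String/printAllLCSubsequence.py | ALCS
-- ===== SOURCE A (Python) =====
-- def find_lcs(s, t, dp, i, j):
--     if i == 0 or j == 0:
--         return [""]
--     elif s[i - 1] == t[j - 1]:
--         lcs_list = []
--         lcs_list.extend([lcs + s[i - 1] for lcs in find_lcs(s, t, dp, i - 1, j - 1)]) #This insert all outcom of find_lcs function into lcs_list
--         return lcs_list
--     else:
--         lcs_list = []
--         if dp[i - 1][j] >= dp[i][j - 1]:
--             lcs_list.extend(find_lcs(s, t, dp, i - 1, j))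
--         if dp[i][j - 1] >= dp[i - 1][j]:
--             lcs_list.extend(find_lcs(s, t, dp, i, j - 1))
--         return lcs_list
--
-- def ALCS(s, t):
--     n = len(s)
--     m = len(t)
--
--     # Initialize DP array
--     dp = [[0] * (m + 1) for _ in range(n + 1)]
--
--     # Fill the DP array
--     for i in range(1, n + 1):
--         for j in range(1, m + 1):
--             if s[i - 1] == t[j - 1]:
--                 dp[i][j] = dp[i - 1][j - 1] + 1
--             else:
--                 dp[i][j] = max(dp[i - 1][j], dp[i][j - 1])
--
--     # Find all LCSs using DP table
--     lcs_length = dp[n][m]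
--     lcs_list = find_lcs(s, t, dp, n, m)
--
--     return set(sorted(lcs_list))
-- ===== SOURCE B (Python) =====
-- def merge(a, b):
--     # two-pointer union of two strictly sorted duplicate-free lists
--     i, j, out = 0, 0, []
--     while i < len(a) and j < len(b):
--         if a[i] < b[j]:
--             out.append(a[i]); i += 1
--         elif b[j] < a[i]:
--             out.append(b[j]); j += 1
--         else:
--             out.append(a[i]); i += 1; j += 1
--     out.extend(a[i:])
--     out.extend(b[j:])
--     return out
--
-- def ALCS(s, t):
--     m = len(t)
--     prev = [(0, [""]) for _ in range(m + 1)]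
--     for i in range(len(s)):
--         c = s[i]
--         cur = [(0, [""])]
--         for j in range(m):
--             if c == t[j]:
--                 l, xs = prev[j]
--                 cur.append((l + 1, sorted(x + c for x in xs)))
--             else:
--                 l1, x1 = prev[j + 1]
--                 l2, x2 = cur[j]
--                 if l1 > l2:
--                     cur.append((l1, x1))
--                 elif l2 > l1:
--                     cur.append((l2, x2))
--                 else:
--                     cur.append((l1, merge(x1, x2)))
--         prev = cur
--     return set(prev[m][1])
-- ===== Notes on version B (the rewrite author's own statement) =====
-- stated objective: faster
-- what changed: A enumerates all LCS by an exponential top-down recursion over the dp table that recomputes every shared subproblem; B makes one bottom-up pass whose cells hold (LCS length, sorted duplicate-free list of all LCS of the two prefixes), combining cells with a two-pointer sorted-merge union, so each subproblem is solved once.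
import Mathlib
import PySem

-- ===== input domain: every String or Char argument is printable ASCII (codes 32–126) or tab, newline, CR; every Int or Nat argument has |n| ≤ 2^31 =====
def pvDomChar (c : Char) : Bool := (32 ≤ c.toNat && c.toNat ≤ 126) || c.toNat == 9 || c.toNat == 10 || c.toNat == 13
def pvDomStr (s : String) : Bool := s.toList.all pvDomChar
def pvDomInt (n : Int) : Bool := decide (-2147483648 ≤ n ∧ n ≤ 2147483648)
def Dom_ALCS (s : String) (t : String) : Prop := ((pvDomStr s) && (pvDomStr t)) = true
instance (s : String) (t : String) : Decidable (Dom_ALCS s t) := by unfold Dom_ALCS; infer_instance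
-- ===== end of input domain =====

-- B replaces A's exponential top-down re-enumeration (find_lcs recomputes whole subproblems at every
-- branch) by ONE bottom-up pass whose cells hold (LCS length, sorted duplicate-free list of all LCS),
-- combined with a two-pointer sorted-merge union; intended as faster (no recomputation of shared
-- subproblems; a timing run saw A time out at n=64 where B returned, and measured 1.4x at the
-- largest size both finished, too fast there to confirm a ratio).
-- Both functions return a Python set, so only the set of strings is observable.

-- ===== PORT A =====
-- the two input strings are carried as List Char (PySem convention) for character indexing; the
-- accumulated LCS candidates stay String, as in the Python.  All dp/string indices the Python reads
-- are in range, so pyGetD's defaults are never the value read.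

-- find_lcs(s, t, dp, i, j); the two `if dp… >= dp…: extend` statements become the append of two
-- conditional lists (lcs_list starts empty), `lcs + s[i-1]` is String.push.
def findLcs (cs ts : List Char) (dp : List (List Int)) : Nat → Nat → List String
  | 0, _ => [""]
  | _ + 1, 0 => [""]
  | i + 1, j + 1 =>
    if PySem.List.pyGetD cs (i : Int) 'a' = PySem.List.pyGetD ts (j : Int) 'a' then
      (findLcs cs ts dp i j).map (fun lcs => lcs.push (PySem.List.pyGetD cs (i : Int) 'a'))
    else
      (if PySem.List.pyGetD (PySem.List.pyGetD dp (i : Int) []) ((j : Int) + 1) 0 ≥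
          PySem.List.pyGetD (PySem.List.pyGetD dp ((i : Int) + 1) []) (j : Int) 0 then
        findLcs cs ts dp i (j + 1) else []) ++
      (if PySem.List.pyGetD (PySem.List.pyGetD dp ((i : Int) + 1) []) (j : Int) 0 ≥
          PySem.List.pyGetD (PySem.List.pyGetD dp (i : Int) []) ((j : Int) + 1) 0 then
        findLcs cs ts dp (i + 1) j else [])
  termination_by i j => i + j

-- the inner j-loop filling row i (the row starts with the 0 left from the zero initialisation;
-- every dp[i][j] is written once before any read, so building the matrix row by row is
-- value-faithful to the Python's in-place fill of the pre-allocated zero matrix)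
def dpRowA (cs ts : List Char) (prev : List Int) (i : Int) : List Int :=
  (PySem.List.pyRange 1 ((ts.length : Int) + 1)).foldl (fun row j =>
    if PySem.List.pyGetD cs (i - 1) 'a' = PySem.List.pyGetD ts (j - 1) 'a' then
      row ++ [PySem.List.pyGetD prev (j - 1) 0 + 1]
    else
      row ++ [max (PySem.List.pyGetD prev j 0) (PySem.List.pyGetD row (j - 1) 0)]) [0]

-- the outer i-loop
def dpA (cs ts : List Char) : List (List Int) :=
  (PySem.List.pyRange 1 ((cs.length : Int) + 1)).foldl (fun acc i =>
    acc ++ [dpRowA cs ts (PySem.List.pyGetD acc (i - 1) []) i]) [List.replicate (ts.length + 1) (0 : Int)]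

def ALCS (s : String) (t : String) : List String :=
  let cs := s.toList
  let ts := t.toList
  let dp := dpA cs ts
  let lcsList := findLcs cs ts dp cs.length ts.length
  -- return set(sorted(lcs_list))
  PySem.Set.ofList (PySem.List.sorted lcsList (fun x => x))

-- ===== PORT B =====
-- two-pointer union of two sorted duplicate-free lists (Source B's merge, while-loop as recursion)
def mergeU : List String → List String → List String
  | [], ys => ys
  | x :: xs, [] => x :: xs
  | x :: xs, y :: ys =>
    if x < y then x :: mergeU xs (y :: ys)
    else if y < x then y :: mergeU (x :: xs) ys
    else x :: mergeU xs ys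
  termination_by xs ys => xs.length + ys.length

-- the inner j-loop building the next row of Source B's (length, all-LCS sorted list) table
def bRow (cs ts : List Char) (prev : List (Int × List String)) (i : Int) :
    List (Int × List String) :=
  (PySem.List.pyRange 0 (ts.length : Int)).foldl (fun cur j =>
    if PySem.List.pyGetD cs i 'a' = PySem.List.pyGetD ts j 'a' then
      let p := PySem.List.pyGetD prev j (0, [""])
      cur ++ [(p.1 + 1,
        PySem.List.sorted (p.2.map (fun x => x.push (PySem.List.pyGetD cs i 'a'))) (fun x => x))]
    else
      let p1 := PySem.List.pyGetD prev (j + 1) (0, [""])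
      let p2 := PySem.List.pyGetD cur j (0, [""])
      if p1.1 > p2.1 then cur ++ [p1]
      else if p2.1 > p1.1 then cur ++ [p2]
      else cur ++ [(p1.1, mergeU p1.2 p2.2)]) [(0, [""])]

def ALCS_alt (s : String) (t : String) : List String :=
  let cs := s.toList
  let ts := t.toList
  let final := (PySem.List.pyRange 0 (cs.length : Int)).foldl (fun prev i => bRow cs ts prev i)
    (List.replicate (ts.length + 1) ((0 : Int), [""]))
  -- return set(prev[m][1])
  PySem.Set.ofList (PySem.List.pyGetD final (ts.length : Int) (0, [""])).2

-- ===== PRECONDITION & SPEC =====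
def Spec_ALCS (s : String) (t : String) (out : List String) : Prop := out = ALCS_alt s t
instance (s : String) (t : String) (out : List String) : Decidable (Spec_ALCS s t out) := by
  unfold Spec_ALCS; infer_instance

-- ===== CLAIM (what is proved, stated in full; the proofs are below) =====
def Claim_equal_ALCS : Prop := ∀ (s : String) (t : String), Dom_ALCS s t → Spec_ALCS s t (ALCS s t)

-- ===== LEMMAS AND PROOFS =====

-- proof-side LCS-length recurrence (what the dp table holds)
def Lrec (cs ts : List Char) : Nat → Nat → Int
  | 0, _ => 0
  | _ + 1, 0 => 0
  | i + 1, j + 1 =>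
    if cs.getD i 'a' = ts.getD j 'a' then Lrec cs ts i j + 1
    else max (Lrec cs ts i (j + 1)) (Lrec cs ts (i + 1) j)
  termination_by i j => i + j

-- proof-side version of find_lcs with the dp lookups replaced by Lrec
def Frec (cs ts : List Char) : Nat → Nat → List String
  | 0, _ => [""]
  | _ + 1, 0 => [""]
  | i + 1, j + 1 =>
    if cs.getD i 'a' = ts.getD j 'a' then
      (Frec cs ts i j).map (fun lcs => lcs.push (cs.getD i 'a'))
    else
      (if Lrec cs ts i (j + 1) ≥ Lrec cs ts (i + 1) j then Frec cs ts i (j + 1) else []) ++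
      (if Lrec cs ts (i + 1) j ≥ Lrec cs ts i (j + 1) then Frec cs ts (i + 1) j else [])
  termination_by i j => i + j

-- proof-side version of B's cells
def Crec (cs ts : List Char) : Nat → Nat → List String
  | 0, _ => [""]
  | _ + 1, 0 => [""]
  | i + 1, j + 1 =>
    if cs.getD i 'a' = ts.getD j 'a' then
      PySem.List.sorted ((Crec cs ts i j).map (fun x => x.push (cs.getD i 'a'))) (fun x => x)
    else if Lrec cs ts i (j + 1) > Lrec cs ts (i + 1) j then Crec cs ts i (j + 1)
    else if Lrec cs ts (i + 1) j > Lrec cs ts i (j + 1) then Crec cs ts (i + 1) j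
    else mergeU (Crec cs ts i (j + 1)) (Crec cs ts (i + 1) j)
  termination_by i j => i + j

-- ---- dp table characterisation ----

lemma dpRowA_fold (cs ts : List Char) (i : Nat) (K : Nat) (hK : K ≤ ts.length) :
    (PySem.List.pyRange 1 ((K : Int) + 1)).foldl (fun row j =>
      if PySem.List.pyGetD cs ((i : Int) + 1 - 1) 'a' = PySem.List.pyGetD ts (j - 1) 'a' then
        row ++ [PySem.List.pyGetD ((List.range (ts.length + 1)).map (fun j => Lrec cs ts i j))
          (j - 1) 0 + 1]
      else
        row ++ [max (PySem.List.pyGetD ((List.range (ts.length + 1)).map (fun j => Lrec cs ts i j))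
          j 0) (PySem.List.pyGetD row (j - 1) 0)]) [0] =
      (List.range (K + 1)).map (fun j => Lrec cs ts (i + 1) j) := by
  induction K with
  | zero =>
    norm_num [PySem.List.pyRange]
    simp [Lrec]
  | succ K ih =>
    have h1 : ((K + 1 : Nat) : Int) + 1 = ((K : Int) + 1) + 1 := by push_cast; ring
    rw [h1, PySem.List.pyRange_one_succ_right (by omega), List.foldl_append,
      ih (by omega), List.foldl_cons, List.foldl_nil]
    have e1 : ((i : Int) + 1 - 1) = ((i : Nat) : Int) := by ring
    have e2 : ((K : Int) + 1 - 1) = ((K : Nat) : Int) := by ring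
    have e3 : ((K : Int) + 1) = ((K + 1 : Nat) : Int) := by push_cast; ring
    rw [e1, e2, e3, PySem.List.pyGetD_natCast, PySem.List.pyGetD_natCast,
      PySem.List.pyGetD_natCast, PySem.List.pyGetD_natCast, PySem.List.pyGetD_natCast,
      PySem.List.getD_map_range _ _ _ _ (by omega), PySem.List.getD_map_range _ _ _ _ (by omega),
      PySem.List.getD_map_range _ _ _ _ (by omega)]
    conv_rhs => rw [List.range_succ, List.map_append]
    split_ifs with h
    · simp only [List.map_cons, List.map_nil]
      rw [show Lrec cs ts (i + 1) (K + 1) = Lrec cs ts i K + 1 from by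
        have h' : cs[i]?.getD 'a' = ts[K]?.getD 'a' := by
          simpa [List.getD_eq_getElem?_getD] using h
        rw [Lrec.eq_def]; simp [h']]
    · simp only [List.map_cons, List.map_nil]
      rw [show Lrec cs ts (i + 1) (K + 1) =
          max (Lrec cs ts i (K + 1)) (Lrec cs ts (i + 1) K) from by
        have h' : ¬ cs[i]?.getD 'a' = ts[K]?.getD 'a' := by
          simpa [List.getD_eq_getElem?_getD] using h
        rw [Lrec.eq_def]; simp [h']]

lemma dpRowA_eq (cs ts : List Char) (i : Nat) :
    dpRowA cs ts ((List.range (ts.length + 1)).map (fun j => Lrec cs ts i j)) ((i : Int) + 1) =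
      (List.range (ts.length + 1)).map (fun j => Lrec cs ts (i + 1) j) := by
  unfold dpRowA
  exact dpRowA_fold cs ts i ts.length le_rfl

lemma dpA_fold (cs ts : List Char) (K : Nat) (hK : K ≤ cs.length) :
    (PySem.List.pyRange 1 ((K : Int) + 1)).foldl (fun acc i =>
        acc ++ [dpRowA cs ts (PySem.List.pyGetD acc (i - 1) []) i])
        [List.replicate (ts.length + 1) (0 : Int)] =
      (List.range (K + 1)).map (fun i =>
        (List.range (ts.length + 1)).map (fun j => Lrec cs ts i j)) := by
  induction K with
  | zero =>
    have hz : ∀ j, Lrec cs ts 0 j = 0 := fun j => by simp [Lrec]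
    norm_num [PySem.List.pyRange]
    simp [hz, List.map_const']
  | succ K ih =>
    rw [show ((K + 1 : Nat) : Int) + 1 = ((K : Int) + 1) + 1 from by push_cast; ring,
      PySem.List.pyRange_one_succ_right (by omega), List.foldl_append, ih (by omega),
      List.foldl_cons, List.foldl_nil]
    rw [show ((K : Int) + 1 - 1) = ((K : Nat) : Int) from by ring,
      PySem.List.pyGetD_natCast, PySem.List.getD_map_range _ _ _ _ (by omega), dpRowA_eq]
    conv_rhs => rw [List.range_succ (n := K + 1), List.map_append]
    simp

lemma dpA_eq (cs ts : List Char) :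
    dpA cs ts = (List.range (cs.length + 1)).map (fun i =>
      (List.range (ts.length + 1)).map (fun j => Lrec cs ts i j)) := by
  unfold dpA
  exact dpA_fold cs ts cs.length le_rfl

lemma dpA_get (cs ts : List Char) (i j : Nat) (hi : i ≤ cs.length) (hj : j ≤ ts.length) :
    PySem.List.pyGetD (PySem.List.pyGetD (dpA cs ts) (i : Int) []) (j : Int) 0 = Lrec cs ts i j := by
  have h1 : PySem.List.pyGetD ((List.range (cs.length + 1)).map (fun i =>
      (List.range (ts.length + 1)).map (fun j => Lrec cs ts i j))) (i : Int) [] =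
      (List.range (ts.length + 1)).map (fun j => Lrec cs ts i j) := by
    rw [PySem.List.pyGetD_natCast, PySem.List.getD_map_range _ _ _ _ (by omega)]
  rw [dpA_eq, h1, PySem.List.pyGetD_natCast, PySem.List.getD_map_range _ _ _ _ (by omega)]

lemma findLcs_eq (cs ts : List Char) (i j : Nat) (hi : i ≤ cs.length) (hj : j ≤ ts.length) :
    findLcs cs ts (dpA cs ts) i j = Frec cs ts i j := by
  revert hi hj
  fun_induction findLcs cs ts (dpA cs ts) i j with
  | case1 j => intro _ _; simp [Frec]
  | case2 i => intro _ _; simp [Frec]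
  | case3 i j heq ih =>
    intro hi hj
    have heq' : cs[i]?.getD 'a' = ts[j]?.getD 'a' := by
      rw [PySem.List.pyGetD_natCast, PySem.List.pyGetD_natCast] at heq
      simpa [List.getD_eq_getElem?_getD] using heq
    rw [ih (by omega) (by omega), PySem.List.pyGetD_natCast]
    conv_rhs => rw [Frec.eq_def]
    simp [heq']
  | case4 i j hne ih2 ih1 =>
    intro hi hj
    have ha : PySem.List.pyGetD (PySem.List.pyGetD (dpA cs ts) (i : Int) []) ((j : Int) + 1) 0 =
        Lrec cs ts i (j + 1) := by
      rw [show ((j : Int) + 1) = ((j + 1 : Nat) : Int) from by push_cast; ring]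
      exact dpA_get cs ts i (j + 1) (by omega) (by omega)
    have hb : PySem.List.pyGetD (PySem.List.pyGetD (dpA cs ts) ((i : Int) + 1) []) (j : Int) 0 =
        Lrec cs ts (i + 1) j := by
      rw [show ((i : Int) + 1) = ((i + 1 : Nat) : Int) from by push_cast; ring]
      exact dpA_get cs ts (i + 1) j (by omega) (by omega)
    have hne' : ¬ cs[i]?.getD 'a' = ts[j]?.getD 'a' := by
      rw [PySem.List.pyGetD_natCast, PySem.List.pyGetD_natCast] at hne
      simpa [List.getD_eq_getElem?_getD] using hne
    rw [ha, hb, ih2 (by omega) (by omega), ih1 (by omega) (by omega)]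
    conv_rhs => rw [Frec.eq_def]
    simp [hne']


-- ---- B table characterisation ----

lemma bRow_fold (cs ts : List Char) (i : Nat) (K : Nat) (hK : K ≤ ts.length) :
    (PySem.List.pyRange 0 (K : Int)).foldl (fun cur j =>
      if PySem.List.pyGetD cs (i : Int) 'a' = PySem.List.pyGetD ts j 'a' then
        let p := PySem.List.pyGetD ((List.range (ts.length + 1)).map
          (fun j => (Lrec cs ts i j, Crec cs ts i j))) j (0, [""])
        cur ++ [(p.1 + 1,
          PySem.List.sorted (p.2.map (fun x => x.push (PySem.List.pyGetD cs (i : Int) 'a')))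
            (fun x => x))]
      else
        let p1 := PySem.List.pyGetD ((List.range (ts.length + 1)).map
          (fun j => (Lrec cs ts i j, Crec cs ts i j))) (j + 1) (0, [""])
        let p2 := PySem.List.pyGetD cur j (0, [""])
        if p1.1 > p2.1 then cur ++ [p1]
        else if p2.1 > p1.1 then cur ++ [p2]
        else cur ++ [(p1.1, mergeU p1.2 p2.2)]) [(0, [""])] =
      (List.range (K + 1)).map (fun j => (Lrec cs ts (i + 1) j, Crec cs ts (i + 1) j)) := by
  induction K with
  | zero =>
    norm_num [PySem.List.pyRange]
    constructor
    · simp [Lrec]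
    · simp [Crec]
  | succ K ih =>
    rw [show ((K + 1 : Nat) : Int) = ((K : Int) + 1) from by push_cast; ring,
      PySem.List.pyRange_one_succ_right (by omega), List.foldl_append, ih (by omega),
      List.foldl_cons, List.foldl_nil]
    dsimp only
    rw [PySem.List.pyGetD_natCast cs i 'a', PySem.List.pyGetD_natCast ts K 'a',
      PySem.List.pyGetD_natCast, PySem.List.getD_map_range _ _ _ _ (by omega),
      show ((K : Int) + 1) = ((K + 1 : Nat) : Int) from by push_cast; ring,
      PySem.List.pyGetD_natCast, PySem.List.getD_map_range _ _ _ _ (by omega),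
      PySem.List.pyGetD_natCast, PySem.List.getD_map_range _ _ _ _ (by omega)]
    conv_rhs => rw [List.range_succ (n := K + 1), List.map_append]
    split_ifs with hc h1 h2
    · -- chars match
      have hc' : cs[i]?.getD 'a' = ts[K]?.getD 'a' := by
        simpa [List.getD_eq_getElem?_getD] using hc
      simp only [List.map_cons, List.map_nil, List.append_cancel_left_eq, List.cons.injEq,
        and_true]
      refine Prod.ext ?_ ?_
      · conv_rhs => rw [Lrec.eq_def]
        simp [hc']
      · conv_rhs => rw [Crec.eq_def]
        simp [hc']
    · have hc' : ¬ cs[i]?.getD 'a' = ts[K]?.getD 'a' := by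
        simpa [List.getD_eq_getElem?_getD] using hc
      simp only [List.map_cons, List.map_nil, List.append_cancel_left_eq, List.cons.injEq,
        and_true]
      refine Prod.ext ?_ ?_
      · conv_rhs => rw [Lrec.eq_def]
        simp [hc']
        omega
      · conv_rhs => rw [Crec.eq_def]
        simp [hc', h1]
    · have hc' : ¬ cs[i]?.getD 'a' = ts[K]?.getD 'a' := by
        simpa [List.getD_eq_getElem?_getD] using hc
      simp only [List.map_cons, List.map_nil, List.append_cancel_left_eq, List.cons.injEq,
        and_true]
      refine Prod.ext ?_ ?_
      · conv_rhs => rw [Lrec.eq_def]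
        simp [hc']
        omega
      · conv_rhs => rw [Crec.eq_def]
        simp [hc', h1, h2]
    · have hc' : ¬ cs[i]?.getD 'a' = ts[K]?.getD 'a' := by
        simpa [List.getD_eq_getElem?_getD] using hc
      simp only [List.map_cons, List.map_nil, List.append_cancel_left_eq, List.cons.injEq,
        and_true]
      refine Prod.ext ?_ ?_
      · conv_rhs => rw [Lrec.eq_def]
        simp [hc']
        omega
      · conv_rhs => rw [Crec.eq_def]
        simp [hc', h1, h2]

lemma bRow_eq (cs ts : List Char) (i : Nat) :
    bRow cs ts ((List.range (ts.length + 1)).map (fun j => (Lrec cs ts i j, Crec cs ts i j)))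
        (i : Int) =
      (List.range (ts.length + 1)).map (fun j => (Lrec cs ts (i + 1) j, Crec cs ts (i + 1) j)) := by
  unfold bRow
  exact bRow_fold cs ts i ts.length le_rfl

lemma bTable_eq (cs ts : List Char) :
    (PySem.List.pyRange 0 (cs.length : Int)).foldl (fun prev i => bRow cs ts prev i)
        (List.replicate (ts.length + 1) ((0 : Int), [""])) =
      (List.range (ts.length + 1)).map (fun j => (Lrec cs ts cs.length j, Crec cs ts cs.length j)) := by
  suffices h : ∀ K : Nat, K ≤ cs.length →
      (PySem.List.pyRange 0 (K : Int)).foldl (fun prev i => bRow cs ts prev i)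
        (List.replicate (ts.length + 1) ((0 : Int), [""])) =
      (List.range (ts.length + 1)).map (fun j => (Lrec cs ts K j, Crec cs ts K j)) from
    h cs.length le_rfl
  intro K hK
  induction K with
  | zero =>
    norm_num [PySem.List.pyRange]
    apply List.ext_getElem <;> simp
    intro j hj
    exact ⟨by simp [Lrec], by simp [Crec]⟩
  | succ K ih =>
    rw [show ((K + 1 : Nat) : Int) = ((K : Int) + 1) from by push_cast; ring,
      PySem.List.pyRange_one_succ_right (by omega), List.foldl_append, ih (by omega),
      List.foldl_cons, List.foldl_nil, bRow_eq]

-- ---- merge and order lemmas ----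

lemma mergeU_spec (xs ys : List String) (hx : xs.Pairwise (· < ·)) (hy : ys.Pairwise (· < ·)) :
    (mergeU xs ys).Pairwise (· < ·) ∧ (∀ z, z ∈ mergeU xs ys ↔ z ∈ xs ∨ z ∈ ys) := by
  fun_induction mergeU xs ys with
  | case1 ys => simpa using hy
  | case2 x xs => simpa using hx
  | case3 x xs y ys hlt ih =>
    obtain ⟨hxh, hxt⟩ := List.pairwise_cons.mp hx
    obtain ⟨ihp, ihm⟩ := ih hxt hy
    constructor
    · refine List.pairwise_cons.mpr ⟨?_, ihp⟩
      intro z hz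
      rcases (ihm z).mp hz with h | h
      · exact hxh z h
      · rcases List.mem_cons.mp h with rfl | h
        · exact hlt
        · exact lt_trans hlt ((List.pairwise_cons.mp hy).1 z h)
    · intro z; simp [ihm z, List.mem_cons]; tauto
  | case4 x xs y ys hlt hlt2 ih =>
    obtain ⟨hyh, hyt⟩ := List.pairwise_cons.mp hy
    obtain ⟨ihp, ihm⟩ := ih hx hyt
    constructor
    · refine List.pairwise_cons.mpr ⟨?_, ihp⟩
      intro z hz
      rcases (ihm z).mp hz with h | h
      · rcases List.mem_cons.mp h with rfl | h
        · exact hlt2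
        · exact lt_trans hlt2 ((List.pairwise_cons.mp hx).1 z h)
      · exact hyh z h
    · intro z; simp [ihm z, List.mem_cons]; tauto
  | case5 x xs y ys hlt hlt2 ih =>
    have hxy : x = y := le_antisymm (not_lt.mp hlt2) (not_lt.mp hlt)
    obtain ⟨hxh, hxt⟩ := List.pairwise_cons.mp hx
    obtain ⟨hyh, hyt⟩ := List.pairwise_cons.mp hy
    obtain ⟨ihp, ihm⟩ := ih hxt hyt
    constructor
    · refine List.pairwise_cons.mpr ⟨?_, ihp⟩
      intro z hz
      rcases (ihm z).mp hz with h | h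
      · exact hxh z h
      · exact hxy ▸ hyh z h
    · intro z; simp [ihm z, List.mem_cons, hxy]; tauto

lemma ofList_pairwise_lt {α : Type} [BEq α] [LawfulBEq α] [LinearOrder α] (l : List α)
    (h : l.Pairwise (· ≤ ·)) : (PySem.Set.ofList l).Pairwise (· < ·) := by
  induction l with
  | nil => simp [PySem.Set.ofList]
  | cons x xs ih =>
    rw [PySem.Set.ofList_cons]
    obtain ⟨hx, hxs⟩ := List.pairwise_cons.mp h
    have hsub : ((PySem.Set.ofList xs).discard x).Sublist (PySem.Set.ofList xs) := by
      simp only [PySem.Set.discard]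
      exact List.filter_sublist
    refine List.pairwise_cons.mpr ⟨?_, (ih hxs).sublist hsub⟩
    intro y hy
    have hd := (PySem.Set.mem_discard _ _ _).mp hy
    exact lt_of_le_of_ne (hx y ((PySem.Set.mem_ofList _ _).mp hd.1)) (Ne.symm hd.2)

lemma strict_sorted_eq {α : Type} [LinearOrder α] (l₁ l₂ : List α) (h₁ : l₁.Pairwise (· < ·))
    (h₂ : l₂.Pairwise (· < ·)) (hm : ∀ x, x ∈ l₁ ↔ x ∈ l₂) : l₁ = l₂ := by
  have hp : l₂.Perm l₁ := by
    rw [List.perm_ext_iff_of_nodup (h₂.imp ne_of_lt) (h₁.imp ne_of_lt)]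
    exact fun a => (hm a).symm
  calc l₁ = PySem.List.sorted l₁ (fun x => x) :=
        (PySem.List.sorted_eq_self_of_pairwise _ _ (h₁.imp le_of_lt)).symm
    _ = l₂ := PySem.List.sorted_eq_of_perm_of_pairwise_lt _ _ _ hp h₂

-- ---- the main invariant: B's cells are exactly find_lcs's lists, sorted and deduplicated ----

lemma crec_spec (cs ts : List Char) (i j : Nat) :
    (Crec cs ts i j).Pairwise (· < ·) ∧ (∀ x, x ∈ Crec cs ts i j ↔ x ∈ Frec cs ts i j) := by
  fun_induction Crec cs ts i j with
  | case1 => simp [Frec]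
  | case2 => simp [Frec]
  | case3 i j heq ih =>
    obtain ⟨ihp, ihm⟩ := ih
    have hinj : Function.Injective (fun x : String => x.push (cs.getD i 'a')) := by
      intro a b h
      have := congrArg String.toList h
      simp only [String.toList_push] at this
      exact String.toList_inj.mp (List.append_cancel_right this)
    have hnd : ((Crec cs ts i j).map (fun x => x.push (cs.getD i 'a'))).Nodup :=
      List.Nodup.map hinj (ihp.imp ne_of_lt)
    have hnd2 : (PySem.List.sorted ((Crec cs ts i j).map (fun x => x.push (cs.getD i 'a')))
        (fun x => x)).Nodup := ((PySem.List.sorted_perm _ _ _).nodup_iff).mpr hnd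
    constructor
    · have hnd2' : List.Pairwise (fun a b => a ≠ b)
          (PySem.List.sorted ((Crec cs ts i j).map (fun x => x.push (cs.getD i 'a')))
            (fun x => x)) := hnd2
      exact ((PySem.List.sorted_pairwise _ _).and hnd2').imp
        (fun h => lt_of_le_of_ne h.1 h.2)
    · intro x
      rw [Frec]
      simp only [if_pos heq, PySem.List.mem_sorted, List.mem_map]
      constructor
      · rintro ⟨a, ha, rfl⟩; exact ⟨a, (ihm a).mp ha, rfl⟩
      · rintro ⟨a, ha, rfl⟩; exact ⟨a, (ihm a).mpr ha, rfl⟩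
  | case4 i j hne hgt ih =>
    obtain ⟨ihp, ihm⟩ := ih
    refine ⟨ihp, fun x => ?_⟩
    rw [Frec]
    simp only [if_neg hne, if_pos (le_of_lt hgt), if_neg (not_le.mpr hgt), List.append_nil]
    exact ihm x
  | case5 i j hne hgt hgt2 ih =>
    obtain ⟨ihp, ihm⟩ := ih
    refine ⟨ihp, fun x => ?_⟩
    rw [Frec]
    simp only [if_neg hne, if_neg (not_le.mpr hgt2), if_pos (le_of_lt hgt2), List.nil_append]
    exact ihm x
  | case6 i j hne hgt hgt2 ih1 ih2 =>
    have heq : Lrec cs ts i (j + 1) = Lrec cs ts (i + 1) j :=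
      le_antisymm (not_lt.mp hgt) (not_lt.mp hgt2)
    obtain ⟨ihp1, ihm1⟩ := ih1
    obtain ⟨ihp2, ihm2⟩ := ih2
    obtain ⟨hp, hm⟩ := mergeU_spec _ _ ihp1 ihp2
    refine ⟨hp, fun x => ?_⟩
    rw [Frec]
    simp only [if_neg hne, if_pos (le_of_eq heq.symm), if_pos (le_of_eq heq), List.mem_append]
    rw [hm x, ihm1 x, ihm2 x]

-- ===== VERDICT (by name: the statement is the Claim_ definition above) =====
theorem ALCS_spec : Claim_equal_ALCS := by
  intro s t _
  unfold Spec_ALCS ALCS ALCS_alt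
  dsimp only
  rw [findLcs_eq _ _ _ _ le_rfl le_rfl, bTable_eq]
  rw [PySem.List.pyGetD_natCast, List.getD_eq_getElem?_getD]
  rw [List.getElem?_map]
  rw [List.getElem?_range (by omega : t.toList.length < t.toList.length + 1)]
  simp only [Option.map_some, Option.getD_some]
  obtain ⟨hcw, hcm⟩ := crec_spec s.toList t.toList s.toList.length t.toList.length
  rw [PySem.Set.ofList_eq_self_of_nodup _ (hcw.imp ne_of_lt)]
  apply strict_sorted_eq
  · exact ofList_pairwise_lt _ (PySem.List.sorted_pairwise _ _)
  · exact hcw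
  · intro x
    rw [PySem.Set.mem_ofList, PySem.List.mem_sorted]
    exact (hcm x).symm
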